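-- pv_equiv track=rewrite | github.com/adkingston/natural_computing | task-1/nn_pso.py | get_weight_split
-- ===== SOURCE A (Python) =====
-- def count_layer_weights(ab, count_bias=True):
--     """
--     counts the edges + biases between two layers in a neural network
--     modifier is used if biases are not there
--     """
--     if count_bias:
--         return ab[1] * (ab[0] + 1)
--     return ab[1] * ab[0]
--
-- def get_layer_weight_shape(ab, with_bias=True):
--     """
--     gets the shape of the weight vector accounting for biases
--     (can be turned off)
--     """
--     if with_bias:
--         return [ab[1], ab[0] + 1]
--     return ab[::-1]  # reverse order
--
-- def get_weight_split(shape=(2, 1)):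
--     """
--     given the shape of a network, this will return the index range of the
--     weights for each layers calculation, and the shape that the subvector would
--     need to be transformed into.
--
--     e.g: if we are calculating between the first and second layers (with bias),
--     with 2 and 4 nodes respectively, then we would want the first 12 elements
--     of the weight vector transformed into a 3x4 matrix
--     """
--     nds = [[0, 0]] + [[shape[i], shape[i + 1]] for i in range(len(shape) - 1)]
--     split = []
--     for j in range(1, len(nds)):
--         if j == 1:
--             split.append([[0, count_layer_weights(nds[j])],
--                           get_layer_weight_shape(nds[j])])
--         else:
--             split.append([[split[j - 2][0][1],
--                            split[j - 2][0][1] + count_layer_weights(nds[j])],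
--                           get_layer_weight_shape(nds[j],
--                                                  (j != len(nds) - 1))])
--     return split
-- ===== SOURCE B (Python) =====
-- def get_weight_split(shape=(2, 1)):
--     """Back-to-front re-implementation: first compute the TOTAL number of
--     weights, then walk the layer pairs right-to-left, carving each pair's
--     index range [end - c, end] off the running end, and reverse at the end."""
--     n = len(shape) - 1  # number of consecutive layer pairs
--     end = sum(shape[k + 1] * (shape[k] + 1) for k in range(n))
--     out = []
--     for k in range(n - 1, -1, -1):
--         a, b = shape[k], shape[k + 1]
--         c = b * (a + 1)
--         out.append([[end - c, end],
--                     [b, a + 1] if (k == 0 or k != n - 1) else [b, a]])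
--         end -= c
--     out.reverse()
--     return out
-- ===== Notes on version B (the rewrite author's own statement) =====
-- stated objective: alternative
-- what changed: A's single forward loop that re-reads its own output list (split[j-2][0][1]) to find each next start is replaced by a subtract-from-total scheme: compute the total weight count once, then traverse the layer pairs right-to-left carving each [end-c, end] range off the running end, building the output back-to-front and reversing it.
import Mathlib
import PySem

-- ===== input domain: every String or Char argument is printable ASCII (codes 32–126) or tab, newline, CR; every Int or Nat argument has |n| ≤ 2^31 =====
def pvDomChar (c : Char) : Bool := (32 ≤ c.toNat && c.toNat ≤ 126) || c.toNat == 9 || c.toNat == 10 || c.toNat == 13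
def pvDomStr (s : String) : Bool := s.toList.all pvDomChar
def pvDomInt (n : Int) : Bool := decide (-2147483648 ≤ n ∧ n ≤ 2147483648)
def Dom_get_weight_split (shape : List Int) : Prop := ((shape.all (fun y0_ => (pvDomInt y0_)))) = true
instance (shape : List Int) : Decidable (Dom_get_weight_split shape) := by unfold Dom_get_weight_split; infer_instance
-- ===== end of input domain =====

-- B replaces A's forward self-indexing loop by a subtract-from-total, right-to-left traversal building the output back-to-front (alternative decomposition); return values are equal.

-- ===== PORT A =====
def count_layer_weights (ab : List Int) (count_bias : Bool) : Int :=
  if count_bias then PySem.List.pyGetD ab 1 0 * (PySem.List.pyGetD ab 0 0 + 1)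
  else PySem.List.pyGetD ab 1 0 * PySem.List.pyGetD ab 0 0

def get_layer_weight_shape (ab : List Int) (with_bias : Bool) : List Int :=
  if with_bias then [PySem.List.pyGetD ab 1 0, PySem.List.pyGetD ab 0 0 + 1]
  else (PySem.List.slice? ab none none (-1)).getD []  -- ab[::-1]; step -1 never raises

def get_weight_split (shape : List Int) : List (List (List Int)) :=
  let nds : List (List Int) :=
    [[0, 0]] ++ (PySem.List.pyRange 0 ((shape.length : Int) - 1) 1).map
      (fun i => [PySem.List.pyGetD shape i 0, PySem.List.pyGetD shape (i + 1) 0])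
  (PySem.List.pyRange 1 ((nds.length : Int)) 1).foldl
    (fun split j =>
      if j == 1 then
        split ++ [[[0, count_layer_weights (PySem.List.pyGetD nds j []) true],
                   get_layer_weight_shape (PySem.List.pyGetD nds j []) true]]
      else
        split ++ [[[PySem.List.pyGetD (PySem.List.pyGetD (PySem.List.pyGetD split (j - 2) []) 0 []) 1 0,
                    PySem.List.pyGetD (PySem.List.pyGetD (PySem.List.pyGetD split (j - 2) []) 0 []) 1 0
                      + count_layer_weights (PySem.List.pyGetD nds j []) true],
                   get_layer_weight_shape (PySem.List.pyGetD nds j []) (j != (nds.length : Int) - 1)]])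
    []

-- ===== PORT B =====
-- total first (sum over range(n)), then a right-to-left fold carving ranges off the end, then reverse
def get_weight_split_alt (shape : List Int) : List (List (List Int)) :=
  let n : Int := (shape.length : Int) - 1
  let total : Int := (PySem.List.pyRange 0 n 1).foldl
    (fun s k => s + PySem.List.pyGetD shape (k + 1) 0 * (PySem.List.pyGetD shape k 0 + 1)) 0
  let res := (PySem.List.pyRange (n - 1) (-1) (-1)).foldl
    (fun st k =>
      let a := PySem.List.pyGetD shape k 0
      let b := PySem.List.pyGetD shape (k + 1) 0
      let c := b * (a + 1)
      (st.1 ++ [[[st.2 - c, st.2],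
                 if k == 0 || k != n - 1 then [b, a + 1] else [b, a]]], st.2 - c))
    (([] : List (List (List Int))), total)
  res.1.reverse

-- ===== PRECONDITION & SPEC =====
def Spec_get_weight_split (shape : List Int) (out : List (List (List Int))) : Prop := out = get_weight_split_alt shape
instance (shape : List Int) (out : List (List (List Int))) : Decidable (Spec_get_weight_split shape out) := by unfold Spec_get_weight_split; infer_instance

-- ===== CLAIM (what is proved, stated in full; the proofs are below) =====
def Claim_equal_get_weight_split : Prop := ∀ (shape : List Int), Dom_get_weight_split shape → Spec_get_weight_split shape (get_weight_split shape)

-- ===== LEMMAS AND PROOFS =====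

/-- The layer pairs both programs work over. -/
def pvPairs (shape : List Int) : List (Int × Int) := shape.zip shape.tail

def pvCnt (p : Int × Int) : Int := p.2 * (p.1 + 1)

/-- Prefix sums of the per-layer weight counts. -/
def pvOff (pairs : List (Int × Int)) (i : Nat) : Int := ((pairs.take i).map pvCnt).sum

/-- The shape entry for layer pair `i` (bias except on a non-first last pair). -/
def pvShp (pairs : List (Int × Int)) (i : Nat) : List Int :=
  let p := pairs.getD i (0, 0)
  if i = 0 ∨ i + 1 ≠ pairs.length then [p.2, p.1 + 1] else [p.2, p.1]

/-- The common closed description of entry `i` of the result. -/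
def pvEnt (pairs : List (Int × Int)) (i : Nat) : List (List Int) :=
  [[pvOff pairs i, pvOff pairs (i + 1)], pvShp pairs i]

lemma pvOff_succ (pairs : List (Int × Int)) (i : Nat) (h : i < pairs.length) :
    pvOff pairs (i + 1) = pvOff pairs i + pvCnt (pairs.getD i (0, 0)) := by
  unfold pvOff
  rw [List.take_add_one, List.map_append, List.sum_append]
  simp [List.getElem?_eq_getElem h, List.getD_eq_getElem?_getD]

lemma pairs_get (shape : List Int) (k : Nat) (h : k < (pvPairs shape).length) :
    (pvPairs shape)[k]? = some (shape.getD k 0, shape.getD (k + 1) 0) := by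
  have hl : (pvPairs shape).length = shape.length - 1 := by
    rw [pvPairs, List.length_zip, List.length_tail]; omega
  have hk1 : k < shape.length := by omega
  have hk2 : k + 1 < shape.length := by omega
  unfold pvPairs at h ⊢
  rw [List.getElem?_eq_getElem h, List.getElem_zip]
  have ht : shape.tail[k]'(by simp; omega) = shape[k + 1] := by
    have := List.getElem?_tail (l := shape) (i := k)
    rw [List.getElem?_eq_getElem (by simp; omega), List.getElem?_eq_getElem hk2] at this
    exact Option.some_injective _ this
  simp [ht, List.getD_eq_getElem?_getD, List.getElem?_eq_getElem hk1, List.getElem?_eq_getElem hk2]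

-- ---------- B side ----------

lemma pvOff_zero (pairs : List (Int × Int)) : pvOff pairs 0 = 0 := by
  simp [pvOff]

lemma pvOff_as_range (pairs : List (Int × Int)) : ∀ i : Nat, i ≤ pairs.length →
    pvOff pairs i = ((List.range i).map (fun k => pvCnt (pairs.getD k (0, 0)))).sum := by
  intro i
  induction i with
  | zero => intro _; simp [pvOff]
  | succ i ih =>
    intro h
    rw [pvOff_succ pairs i (by omega), ih (by omega), List.range_succ, List.map_append,
      List.sum_append]
    simp

lemma totalB (shape : List Int) (hne : shape ≠ []) :
    (PySem.List.pyRange 0 ((shape.length : Int) - 1) 1).foldl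
      (fun s k => s + PySem.List.pyGetD shape (k + 1) 0 * (PySem.List.pyGetD shape k 0 + 1)) 0
    = pvOff (pvPairs shape) (pvPairs shape).length := by
  have hl : (pvPairs shape).length = shape.length - 1 := by
    rw [pvPairs, List.length_zip, List.length_tail]; omega
  set m := (pvPairs shape).length with hm
  have hcast : ((shape.length : Int) - 1) = (m : Int) := by
    have : shape.length ≠ 0 := by simpa [List.length_eq_zero_iff] using hne
    omega
  rw [hcast, pvOff_as_range _ m (le_refl _)]
  -- fold over range m, by induction on m via pyRange_one_succ_right
  clear_value m
  clear hcast hl hm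
  induction m with
  | zero => simp [PySem.List.pyRange_one_eq_nil]
  | succ m ih =>
    rw [show ((m + 1 : Nat) : Int) = (m : Int) + 1 by push_cast; ring,
      PySem.List.pyRange_one_succ_right (by positivity), List.foldl_append, ih]
    simp only [List.foldl_cons, List.foldl_nil, List.range_succ, List.map_append, List.sum_append,
      List.map_cons, List.map_nil, List.sum_cons, List.sum_nil]
    have hg : ∀ j : Nat, PySem.List.pyGetD shape ((j : Nat) : Int) 0 = shape.getD j 0 := by
      intro j; rw [PySem.List.pyGetD_natCast]
    by_cases hlt : m < (pvPairs shape).length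
    · rw [show (m : Int) + 1 = ((m + 1 : Nat) : Int) by push_cast; ring, hg (m + 1), hg m]
      have := pairs_get shape m hlt
      simp [pvCnt, List.getD_eq_getElem?_getD, this]
    · -- m out of range: both sides use default components consistently
      have h1 : (pvPairs shape).getD m (0, 0) = (0, 0) := by
        rw [List.getD_eq_getElem?_getD, List.getElem?_eq_none (by omega)]; rfl
      have hlp : (pvPairs shape).length = shape.length - 1 := by
        rw [pvPairs, List.length_zip, List.length_tail]; omega
      have h2 : PySem.List.pyGetD shape ((m : Int) + 1) 0 = 0 := by
        rw [show (m : Int) + 1 = ((m + 1 : Nat) : Int) by push_cast; ring, PySem.List.pyGetD_natCast,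
          List.getD_eq_getElem?_getD, List.getElem?_eq_none (by omega)]; rfl
      rw [h1, h2]
      simp [pvCnt]

lemma loopB (shape : List Int) (hne : shape ≠ []) :
    ∀ (j : Nat), j ≤ (pvPairs shape).length → ∀ (acc : List (List (List Int))),
    (PySem.List.pyRange ((j : Int) - 1) (-1) (-1)).foldl
      (fun st k =>
        (st.1 ++ [[[st.2 - PySem.List.pyGetD shape (k + 1) 0 * (PySem.List.pyGetD shape k 0 + 1), st.2],
                   if k == 0 || k != ((pvPairs shape).length : Int) - 1 then
                     [PySem.List.pyGetD shape (k + 1) 0, PySem.List.pyGetD shape k 0 + 1]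
                   else [PySem.List.pyGetD shape (k + 1) 0, PySem.List.pyGetD shape k 0]]],
         st.2 - PySem.List.pyGetD shape (k + 1) 0 * (PySem.List.pyGetD shape k 0 + 1)))
      (acc, pvOff (pvPairs shape) j)
    = (acc ++ ((List.range j).map (pvEnt (pvPairs shape))).reverse, 0) := by
  have hl : (pvPairs shape).length = shape.length - 1 := by
    rw [pvPairs, List.length_zip, List.length_tail]; omega
  have hnz : shape.length ≠ 0 := by simpa [List.length_eq_zero_iff] using hne
  intro j
  induction j with
  | zero =>
    intro _ acc
    rw [show ((0 : Nat) : Int) - 1 = -1 by norm_num, PySem.List.pyRange_neg_one_eq_nil (by norm_num)]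
    simp [pvOff_zero]
  | succ j ih =>
    intro hj acc
    have hjlt : j < (pvPairs shape).length := by omega
    rw [show ((j + 1 : Nat) : Int) - 1 = (j : Int) by push_cast; ring,
      PySem.List.pyRange_neg_one_cons (by omega)]
    simp only [List.foldl_cons]
    have hg : ∀ i : Nat, PySem.List.pyGetD shape ((i : Nat) : Int) 0 = shape.getD i 0 := by
      intro i; rw [PySem.List.pyGetD_natCast]
    have hpair := pairs_get shape j hjlt
    have ha : PySem.List.pyGetD shape (j : Int) 0 = ((pvPairs shape).getD j (0, 0)).1 := by
      rw [hg j]; simp [List.getD_eq_getElem?_getD, hpair]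
    have hb : PySem.List.pyGetD shape ((j : Int) + 1) 0 = ((pvPairs shape).getD j (0, 0)).2 := by
      rw [show (j : Int) + 1 = ((j + 1 : Nat) : Int) by push_cast; ring, hg (j + 1)]
      simp [List.getD_eq_getElem?_getD, hpair]
    have hc : pvOff (pvPairs shape) (j + 1)
        - ((pvPairs shape).getD j (0, 0)).2 * (((pvPairs shape).getD j (0, 0)).1 + 1)
        = pvOff (pvPairs shape) j := by
      rw [pvOff_succ _ j hjlt]; simp [pvCnt]
    have hcond : ((j : Int) == 0 || (j : Int) != ((pvPairs shape).length : Int) - 1)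
        = decide (j = 0 ∨ j + 1 ≠ (pvPairs shape).length) := by
      rw [Bool.eq_iff_iff]
      simp only [Bool.or_eq_true, beq_iff_eq, bne_iff_ne, decide_eq_true_eq, ne_eq]
      omega
    simp only [ha, hb, hc, hcond]
    have hent : [[pvOff (pvPairs shape) j, pvOff (pvPairs shape) (j + 1)],
        if decide (j = 0 ∨ j + 1 ≠ (pvPairs shape).length) = true
        then [((pvPairs shape).getD j (0, 0)).2, ((pvPairs shape).getD j (0, 0)).1 + 1]
        else [((pvPairs shape).getD j (0, 0)).2, ((pvPairs shape).getD j (0, 0)).1]]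
        = pvEnt (pvPairs shape) j := by
      by_cases hcc : j = 0 ∨ j + 1 ≠ (pvPairs shape).length <;> simp [pvEnt, pvShp, hcc]
    rw [hent, ih (by omega) (acc ++ [pvEnt (pvPairs shape) j])]
    simp [List.range_succ, List.reverse_append]

lemma alt_eq (shape : List Int) :
    get_weight_split_alt shape
      = (List.range (pvPairs shape).length).map (pvEnt (pvPairs shape)) := by
  rcases eq_or_ne shape [] with rfl | hne
  · decide
  · have hl : (pvPairs shape).length = shape.length - 1 := by
      rw [pvPairs, List.length_zip, List.length_tail]; omega
    have hnz : shape.length ≠ 0 := by simpa [List.length_eq_zero_iff] using hne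
    simp only [get_weight_split_alt]
    rw [totalB shape hne]
    rw [show (shape.length : Int) - 1 - 1 = ((pvPairs shape).length : Int) - 1 by omega]
    rw [loopB shape hne (pvPairs shape).length (le_refl _) []]
    simp

-- ---------- A side ----------

lemma nds_facts (shape : List Int) :
    ([[0, 0]] ++ (PySem.List.pyRange 0 ((shape.length : Int) - 1) 1).map
        (fun i => [PySem.List.pyGetD shape i 0, PySem.List.pyGetD shape (i + 1) 0])).length
      = (pvPairs shape).length + 1 := by
  rw [List.length_append, List.length_map, PySem.List.length_pyRange_one, pvPairs,
    List.length_zip, List.length_tail]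
  simp
  omega

lemma nds_get (shape : List Int) (k : Nat) (hk : k < (pvPairs shape).length) :
    PySem.List.pyGetD ([[0, 0]] ++ (PySem.List.pyRange 0 ((shape.length : Int) - 1) 1).map
        (fun i => [PySem.List.pyGetD shape i 0, PySem.List.pyGetD shape (i + 1) 0]))
        ((k : Int) + 1) []
      = [((pvPairs shape).getD k (0, 0)).1, ((pvPairs shape).getD k (0, 0)).2] := by
  have hplen : (pvPairs shape).length = shape.length - 1 := by
    rw [pvPairs, List.length_zip, List.length_tail]; omega
  have hrlen : ((PySem.List.pyRange 0 ((shape.length : Int) - 1) 1).map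
      (fun i => [PySem.List.pyGetD shape i 0, PySem.List.pyGetD shape (i + 1) 0])).length
      = shape.length - 1 := by
    rw [List.length_map, PySem.List.length_pyRange_one]; omega
  rw [show ((k : Int) + 1) = ((k + 1 : Nat) : Int) by push_cast; ring, PySem.List.pyGetD_natCast]
  rw [List.getD_eq_getElem?_getD, List.getElem?_append_right (by simp), List.getElem?_eq_getElem
    (by simp [hrlen]; omega)]
  simp only [List.length_singleton, Nat.add_sub_cancel, List.getElem_map,
    PySem.List.getElem_pyRange_one]
  have hz : (0 : Int) + (k : Int) = ((k : Nat) : Int) := by ring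
  rw [hz, PySem.List.pyGetD_natCast,
    show ((k : Nat) : Int) + 1 = ((k + 1 : Nat) : Int) by push_cast; ring,
    PySem.List.pyGetD_natCast]
  simp [pairs_get shape k hk, List.getD_eq_getElem?_getD]

lemma loopA (pairs : List (Int × Int)) (nds : List (List Int))
    (hlen : nds.length = pairs.length + 1)
    (hget : ∀ k : Nat, k < pairs.length →
      PySem.List.pyGetD nds ((k : Int) + 1) [] = [(pairs.getD k (0, 0)).1, (pairs.getD k (0, 0)).2]) :
    ∀ m : Nat, m ≤ pairs.length →
    (PySem.List.pyRange 1 ((m : Int) + 1) 1).foldl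
      (fun split j =>
        if j == 1 then
          split ++ [[[0, count_layer_weights (PySem.List.pyGetD nds j []) true],
                     get_layer_weight_shape (PySem.List.pyGetD nds j []) true]]
        else
          split ++ [[[PySem.List.pyGetD (PySem.List.pyGetD (PySem.List.pyGetD split (j - 2) []) 0 []) 1 0,
                      PySem.List.pyGetD (PySem.List.pyGetD (PySem.List.pyGetD split (j - 2) []) 0 []) 1 0
                        + count_layer_weights (PySem.List.pyGetD nds j []) true],
                     get_layer_weight_shape (PySem.List.pyGetD nds j []) (j != (nds.length : Int) - 1)]])
      []
      = (List.range m).map (pvEnt pairs) := by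
  intro m
  induction m with
  | zero => intro _; simp [PySem.List.pyRange_one_eq_nil]
  | succ m ih =>
    intro hm
    have hmlt : m < pairs.length := by omega
    rw [show ((m + 1 : Nat) : Int) + 1 = (((m : Int) + 1) + 1) by push_cast; ring,
      PySem.List.pyRange_one_succ_right (by omega), List.foldl_append, ih (by omega)]
    simp only [List.foldl_cons, List.foldl_nil]
    have hnds := hget m hmlt
    have hcntshape : count_layer_weights (PySem.List.pyGetD nds ((m : Int) + 1) []) true
        = pvCnt (pairs.getD m (0, 0)) := by
      rw [hnds]; simp [count_layer_weights, pvCnt, PySem.List.pyGetD]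
    rcases Nat.eq_zero_or_pos m with hm0 | hmpos
    · subst hm0
      simp only [Nat.cast_zero, zero_add] at hnds hcntshape ⊢
      simp only [beq_self_eq_true, if_true, List.range_one, List.map_cons,
        List.map_nil, List.range_zero]
      rw [hcntshape, hnds]
      simp [pvEnt, pvShp, pvOff, get_layer_weight_shape, PySem.List.pyGetD, List.take_add_one,
        List.getElem?_eq_getElem hmlt, List.getD_eq_getElem?_getD]
    · have hne : ((m : Int) + 1 == 1) = false := by
        simp only [beq_eq_false_iff_ne, ne_eq]
        omega
      rw [hne]
      simp only [Bool.false_eq_true, if_false]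
      -- the previous entry's end offset
      have hprev : PySem.List.pyGetD (PySem.List.pyGetD
          (PySem.List.pyGetD ((List.range m).map (pvEnt pairs)) ((m : Int) + 1 - 2) []) 0 []) 1 0
          = pvOff pairs m := by
        rw [show (m : Int) + 1 - 2 = ((m - 1 : Nat) : Int) by omega, PySem.List.pyGetD_natCast]
        rw [List.getD_eq_getElem?_getD, List.getElem?_eq_getElem (by simp; omega)]
        simp only [List.getElem_map, List.getElem_range, Option.getD_some]
        have : m - 1 + 1 = m := by omega
        simp [pvEnt, this, PySem.List.pyGetD]
      rw [hprev, hcntshape, hnds]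
      have hflag : (((m : Int) + 1) != ((nds.length : Int) - 1))
          = decide (m = 0 ∨ m + 1 ≠ pairs.length) := by
        rw [hlen]
        simp only [ne_eq]
        by_cases hlast : m + 1 = pairs.length <;> simp_all <;> omega
      rw [hflag, List.range_succ, List.map_append]
      congr 1
      simp only [List.map_cons, List.map_nil, pvEnt, pvShp]
      rw [pvOff_succ pairs m hmlt]
      by_cases hc : m = 0 ∨ m + 1 ≠ pairs.length
      · simp [hc, get_layer_weight_shape, PySem.List.pyGetD]
      · simp only [hc, decide_false, if_false, get_layer_weight_shape, Bool.false_eq_true,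
          PySem.List.slice?_none_none_neg_one]
        simp

lemma a_eq (shape : List Int) :
    get_weight_split shape = (List.range (pvPairs shape).length).map (pvEnt (pvPairs shape)) := by
  simp only [get_weight_split]
  have H := loopA (pvPairs shape) _ (nds_facts shape) (fun k hk => nds_get shape k hk)
    (pvPairs shape).length (le_refl _)
  rw [show (((pvPairs shape).length : Int) + 1)
      = ((([[0, 0]] ++ (PySem.List.pyRange 0 ((shape.length : Int) - 1) 1).map
          (fun i => [PySem.List.pyGetD shape i 0, PySem.List.pyGetD shape (i + 1) 0])).length : Int))
      from by rw [nds_facts shape]; push_cast; ring] at H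
  exact H

-- ===== VERDICT (by name: the statement is the Claim_ definition above) =====
theorem get_weight_split_spec : Claim_equal_get_weight_split := by
  intro shape _
  unfold Spec_get_weight_split
  rw [a_eq, alt_eq]
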